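-- pv_equiv track=rewrite | github.com/omtripathi786/scaler_practice_data_structure | Module_4/Sorting/count_pairs.py | count_pairs_merge_array
-- ===== SOURCE A (Python) =====
-- def count_pairs_merge_array(A, B):
--     A.sort()
--     B.sort()
--     m, n = len(A), len(B)
--     pairs = 0
--     i, j, k = 0, 0, 0
--     ans = [0] * (m + n)
--     while i < m and j < n:
--         if A[i] <= B[j]:
--             ans[k] = A[i]
--             i += 1
--             k += 1
--         else:
--             ans[k] = B[j]
--             k += 1
--             j += 1
--             pairs += m - i
--     while i < m:
--         ans[k] = A[i]
--         i += 1
--         k += 1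
--     while j < n:
--         ans[k] = B[j]
--         j += 1
--         k += 1
--
--     return ans, pairs
-- ===== SOURCE B (Python) =====
-- def count_pairs_merge_array(A, B):
--     A.sort()
--     B.sort()
--     m = len(A)
--     ans = sorted(A + B)
--     pairs = 0
--     i = 0
--     for b in B:
--         while i < m and A[i] <= b:
--             i += 1
--         pairs += m - i
--     return ans, pairs
-- ===== Notes on version B (the rewrite author's own statement) =====
-- stated objective: simpler
-- what changed: Replaces the hand-written three-while-loop merge (which interleaves building the merged array with pair counting) by a library sort of A+B for the merged array plus a separate linear two-pointer pass over sorted B counting, for each b, the A-suffix of elements greater than b; both still sort A and B in place.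
import Mathlib
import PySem

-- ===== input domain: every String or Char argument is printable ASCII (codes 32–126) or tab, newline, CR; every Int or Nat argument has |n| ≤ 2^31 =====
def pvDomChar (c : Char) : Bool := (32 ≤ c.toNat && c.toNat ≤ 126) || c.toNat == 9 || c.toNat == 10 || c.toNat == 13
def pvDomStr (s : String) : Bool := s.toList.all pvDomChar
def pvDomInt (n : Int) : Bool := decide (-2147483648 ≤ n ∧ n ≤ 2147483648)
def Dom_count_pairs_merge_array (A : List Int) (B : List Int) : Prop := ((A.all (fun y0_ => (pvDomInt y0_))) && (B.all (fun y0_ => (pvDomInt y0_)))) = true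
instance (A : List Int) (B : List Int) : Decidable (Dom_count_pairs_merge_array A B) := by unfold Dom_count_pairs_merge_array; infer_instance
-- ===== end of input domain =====

-- B replaces A's hand-written merge-and-count loop by sorted(A+B) for the merged list plus a
-- separate two-pointer counting pass (objective: simpler). Both Pythons sort A and B in place;
-- the equivalence proved here is about the return value (the in-place sorts are identical anyway).

-- ===== PORT A =====
-- A's main while loop over indices i (into sorted A) and j (into sorted B), threading pairs:
-- the suffixes A[i:], B[j:] are carried as lists, so 'pairs += m - i' adds the length of A[i:].
-- The two drain while-loops are the 'sa, sb, pairs => (sa ++ sb, pairs)' fallthrough (there one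
-- side is empty, so the append is exactly the one remaining drain loop).
def cpMergeLoop : List Int → List Int → Int → List Int × Int
  | a :: as, b :: bs, pairs =>
      if a ≤ b then
        let r := cpMergeLoop as (b :: bs) pairs
        (a :: r.1, r.2)
      else
        let r := cpMergeLoop (a :: as) bs (pairs + ((a :: as).length : Int))
        (b :: r.1, r.2)
  | sa, sb, pairs => (sa ++ sb, pairs)

def count_pairs_merge_array (A : List Int) (B : List Int) : List Int × Int :=
  let sa := PySem.List.sorted A (fun x => x) false
  let sb := PySem.List.sorted B (fun x => x) false
  cpMergeLoop sa sb 0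

-- ===== PORT B =====
-- B's 'for b in B' loop with the inner 'while i < m and A[i] <= b: i += 1' and 'pairs += m - i':
-- the suffix A[i:] is carried as a list, the inner while is dropWhile, and m - i is its length.
def count_pairs_merge_array_alt (A : List Int) (B : List Int) : List Int × Int :=
  let sa := PySem.List.sorted A (fun x => x) false
  let sb := PySem.List.sorted B (fun x => x) false
  let ans := PySem.List.sorted (sa ++ sb) (fun x => x) false
  let st := sb.foldl
    (fun (st : Int × List Int) b =>
      let rest := st.2.dropWhile (fun a => decide (a ≤ b))
      (st.1 + (rest.length : Int), rest))
    (0, sa)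
  (ans, st.1)

-- ===== PRECONDITION & SPEC =====
def Spec_count_pairs_merge_array (A : List Int) (B : List Int) (out : List Int × Int) : Prop := out = count_pairs_merge_array_alt A B
instance (A : List Int) (B : List Int) (out : List Int × Int) : Decidable (Spec_count_pairs_merge_array A B out) := by unfold Spec_count_pairs_merge_array; infer_instance

-- ===== CLAIM (what is proved, stated in full; the proofs are below) =====
def Claim_equal_count_pairs_merge_array : Prop := ∀ (A : List Int) (B : List Int), Dom_count_pairs_merge_array A B → Spec_count_pairs_merge_array A B (count_pairs_merge_array A B)

-- ===== LEMMAS AND PROOFS =====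

-- the common mathematical value of the pair counter: Σ_{b ∈ sb} #{a ∈ sa | b < a}
def cpPairs (sa sb : List Int) : Int :=
  (sb.map (fun b => ((sa.countP (fun a => decide (b < a))) : Int))).sum

theorem cpPairs_cons_right (sa : List Int) (b : Int) (bs : List Int) :
    cpPairs sa (b :: bs) = ((sa.countP (fun a => decide (b < a))) : Int) + cpPairs sa bs := by
  simp [cpPairs]

theorem cpPairs_cons_left (a : Int) (as sb : List Int) (h : ∀ b' ∈ sb, ¬ b' < a) :
    cpPairs (a :: as) sb = cpPairs as sb := by
  unfold cpPairs
  congr 1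
  apply List.map_congr_left
  intro b' hb'
  have hd : (decide (b' < a)) = false := by simp [h b' hb']
  simp [hd]

-- A-side: the merged list is a permutation of sa ++ sb
theorem cpMergeLoop_perm (sa sb : List Int) (p : Int) :
    (cpMergeLoop sa sb p).1.Perm (sa ++ sb) := by
  fun_induction cpMergeLoop sa sb p with
  | case1 a as b bs pairs hle r ih => simpa using ih
  | case2 a as b bs pairs hle r ih =>
      simpa using (ih.cons b).trans List.perm_middle.symm
  | case3 sa sb pairs h => simp

theorem cpMergeLoop_mem (sa sb : List Int) (p : Int) (x : Int)
    (hx : x ∈ (cpMergeLoop sa sb p).1) : x ∈ sa ∨ x ∈ sb := by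
  have := (cpMergeLoop_perm sa sb p).mem_iff.mp hx
  simpa using this

-- A-side: the merged list is nondecreasing when both inputs are
theorem cpMergeLoop_pairwise (sa sb : List Int) (p : Int)
    (hsa : sa.Pairwise (· ≤ ·)) (hsb : sb.Pairwise (· ≤ ·)) :
    (cpMergeLoop sa sb p).1.Pairwise (· ≤ ·) := by
  fun_induction cpMergeLoop sa sb p with
  | case1 a as b bs pairs hle r ih =>
      simp only [List.pairwise_cons] at hsa ⊢
      refine ⟨?_, ih hsa.2 hsb⟩
      intro x hx
      rcases cpMergeLoop_mem _ _ _ _ hx with h | h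
      · exact hsa.1 x h
      · rcases List.mem_cons.mp h with rfl | h
        · exact hle
        · exact le_trans hle ((List.pairwise_cons.mp hsb).1 x h)
  | case2 a as b bs pairs hle r ih =>
      simp only [List.pairwise_cons] at hsb ⊢
      refine ⟨?_, ih hsa hsb.2⟩
      intro x hx
      rcases cpMergeLoop_mem _ _ _ _ hx with h | h
      · rcases List.mem_cons.mp h with rfl | h
        · omega
        · have := (List.pairwise_cons.mp hsa).1 x h
          omega
      · exact hsb.1 x h
  | case3 sa sb pairs h =>
      cases sa with
      | nil => simpa using hsb
      | cons a as =>
        cases sb with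
        | nil => simpa using hsa
        | cons b bs => exact (h a as b bs rfl rfl).elim

-- A-side: the counter computes cpPairs
theorem cpMergeLoop_pairs (sa sb : List Int) (p : Int)
    (hsa : sa.Pairwise (· ≤ ·)) (hsb : sb.Pairwise (· ≤ ·)) :
    (cpMergeLoop sa sb p).2 = p + cpPairs sa sb := by
  fun_induction cpMergeLoop sa sb p with
  | case1 a as b bs pairs hle r ih =>
      rw [List.pairwise_cons] at hsa
      have heq : cpPairs (a :: as) (b :: bs) = cpPairs as (b :: bs) := by
        apply cpPairs_cons_left
        intro b' hb'
        rcases List.mem_cons.mp hb' with rfl | h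
        · omega
        · have := (List.pairwise_cons.mp hsb).1 b' h
          omega
      simpa [heq] using ih hsa.2 hsb
  | case2 a as b bs pairs hle r ih =>
      rw [List.pairwise_cons] at hsb
      have hcount : (a :: as).countP (fun x => decide (b < x)) = (a :: as).length := by
        apply List.countP_eq_length.mpr
        intro x hx
        rcases List.mem_cons.mp hx with rfl | h
        · simpa using hle
        · have := (List.pairwise_cons.mp hsa).1 x h
          simp; omega
      have hih := ih hsa hsb.2
      show (cpMergeLoop (a :: as) bs (pairs + ((a :: as).length : Int))).2 = _
      rw [hih, cpPairs_cons_right, hcount]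
      ring
  | case3 sa sb pairs h =>
      cases sa with
      | nil => simp [cpPairs]
      | cons a as =>
        cases sb with
        | nil => simp [cpPairs]
        | cons b bs => exact (h a as b bs rfl rfl).elim

-- B-side: on a nondecreasing list, dropping the prefix ≤ b leaves exactly the elements > b
theorem dropWhile_length_sorted (rest : List Int) (b : Int)
    (h : rest.Pairwise (· ≤ ·)) :
    ((rest.dropWhile (fun a => decide (a ≤ b))).length : Int)
      = (rest.countP (fun a => decide (b < a)) : Int) := by
  induction rest with
  | nil => simp
  | cons a r ih =>
    rw [List.pairwise_cons] at h
    by_cases hab : a ≤ b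
    · have hd : decide (b < a) = false := by simp; omega
      simp only [List.dropWhile_cons, List.countP_cons, hd]
      simpa [hab] using ih h.2
    · have : (a :: r).countP (fun x => decide (b < x)) = (a :: r).length := by
        apply List.countP_eq_length.mpr
        intro x hx
        rcases List.mem_cons.mp hx with rfl | hx
        · simp; omega
        · have := h.1 x hx
          simp; omega
      simp only [List.dropWhile_cons, this]
      simp [hab]
-- B-side: the dropped prefix (all ≤ b) contains no element > b' when b ≤ b'
theorem countP_dropWhile_sorted (rest : List Int) (b b' : Int) (hbb : b ≤ b')
    (h : rest.Pairwise (· ≤ ·)) :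
    (rest.dropWhile (fun a => decide (a ≤ b))).countP (fun a => decide (b' < a))
      = rest.countP (fun a => decide (b' < a)) := by
  induction rest with
  | nil => simp
  | cons a r ih =>
    rw [List.pairwise_cons] at h
    by_cases hab : a ≤ b
    · have hd : decide (b' < a) = false := by simp; omega
      simp only [List.dropWhile_cons, List.countP_cons, hd]
      simpa [hab] using ih h.2
    · simp [hab]

-- B-side: the two-pointer fold computes cpPairs
theorem cpFold_pairs (sb : List Int) (rest : List Int) (p : Int)
    (hrest : rest.Pairwise (· ≤ ·)) (hsb : sb.Pairwise (· ≤ ·)) :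
    (sb.foldl
      (fun (st : Int × List Int) b =>
        let r := st.2.dropWhile (fun a => decide (a ≤ b))
        (st.1 + (r.length : Int), r))
      (p, rest)).1 = p + cpPairs rest sb := by
  induction sb generalizing rest p with
  | nil => simp [cpPairs]
  | cons b bs ih =>
    rw [List.pairwise_cons] at hsb
    have hsub : (rest.dropWhile (fun a => decide (a ≤ b))).Pairwise (· ≤ ·) :=
      hrest.sublist (List.dropWhile_sublist _)
    have hstep := ih (rest.dropWhile (fun a => decide (a ≤ b)))
      (p + ((rest.dropWhile (fun a => decide (a ≤ b))).length : Int)) hsub hsb.2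
    simp only [List.foldl_cons, hstep]
    have hpp : cpPairs (rest.dropWhile (fun a => decide (a ≤ b))) bs = cpPairs rest bs := by
      unfold cpPairs
      congr 1
      apply List.map_congr_left
      intro b' hb'
      rw [countP_dropWhile_sorted rest b b' (hsb.1 b' hb') hrest]
    rw [hpp, dropWhile_length_sorted rest b hrest, cpPairs_cons_right]
    ring

-- ===== VERDICT (by name: the statement is the Claim_ definition above) =====
theorem count_pairs_merge_array_spec : Claim_equal_count_pairs_merge_array := by
  intro A B _
  unfold Spec_count_pairs_merge_array count_pairs_merge_array count_pairs_merge_array_alt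
  have hsa : (PySem.List.sorted A (fun x => x) false).Pairwise (· ≤ ·) :=
    PySem.List.sorted_pairwise A (fun x => x)
  have hsb : (PySem.List.sorted B (fun x => x) false).Pairwise (· ≤ ·) :=
    PySem.List.sorted_pairwise B (fun x => x)
  set sa := PySem.List.sorted A (fun x => x) false with hsaDef
  set sb := PySem.List.sorted B (fun x => x) false with hsbDef
  have h1 : PySem.List.sorted (sa ++ sb) (fun x => x) false = (cpMergeLoop sa sb 0).1 :=
    PySem.List.sorted_id_eq_of_perm_of_pairwise (sa ++ sb) ((cpMergeLoop sa sb 0).1) (cpMergeLoop_perm sa sb 0)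
      (cpMergeLoop_pairwise sa sb 0 hsa hsb)
  have h2 := cpMergeLoop_pairs sa sb 0 hsa hsb
  have h3 := cpFold_pairs sb sa 0 hsa hsb
  refine Prod.ext h1.symm ?_
  rw [h2]
  exact h3.symm
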